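-- pv_equiv track=rewrite | github.com/mezzofy/mz-ai-assistant | server/app/skills/available/legal_research.py | _extract_relevant_sections
-- ===== SOURCE A (Python) =====
-- def _extract_relevant_sections(content: str, topic: str) -> str:
--     """Extract sections from KB content relevant to the topic."""
--     if not content or not topic:
--         return ""
--
--     topic_lower = topic.lower()
--     lines = content.split("\n")
--     relevant_lines = []
--     in_relevant_section = False
--
--     for line in lines:
--         line_lower = line.lower()
--         # Section headers that match the topic
--         if line.startswith("#") and topic_lower in line_lower:
--             in_relevant_section = True
--         elif line.startswith("#") and not topic_lower in line_lower:
--             in_relevant_section = False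
--
--         if in_relevant_section:
--             relevant_lines.append(line)
--         elif topic_lower in line_lower:
--             relevant_lines.append(line)
--
--     return "\n".join(relevant_lines[:50])
-- ===== SOURCE B (Python) =====
-- def _extract_relevant_sections(content: str, topic: str) -> str:
--     """Extract sections from KB content relevant to the topic."""
--     if not content or not topic:
--         return ""
--
--     topic_lower = topic.lower()
--
--     # Phase 1: partition into blocks delimited by header lines ('#...').
--     # Each block records whether its header matched the topic; the
--     # pre-header preamble counts as non-matching.
--     blocks = []
--     cur_match = False
--     cur_lines = []
--     for line in content.split("\n"):
--         if line.startswith("#"):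
--             blocks.append((cur_match, cur_lines))
--             cur_match = topic_lower in line.lower()
--             cur_lines = [line]
--         else:
--             cur_lines.append(line)
--     blocks.append((cur_match, cur_lines))
--
--     # Phase 2: matching blocks are kept whole; others are filtered by substring.
--     out = []
--     for match, blk in blocks:
--         if match:
--             out.extend(blk)
--         else:
--             out.extend(l for l in blk if topic_lower in l.lower())
--     return "\n".join(out[:50])
-- ===== Notes on version B (the rewrite author's own statement) =====
-- stated objective: alternative
-- what changed: Replaces A's single stateful scan carrying an in-section flag by a two-phase decomposition: first partition the lines into header-delimited blocks tagged with whether their header matches, then emit matching blocks whole and filter the others by substring.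
import Mathlib
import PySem

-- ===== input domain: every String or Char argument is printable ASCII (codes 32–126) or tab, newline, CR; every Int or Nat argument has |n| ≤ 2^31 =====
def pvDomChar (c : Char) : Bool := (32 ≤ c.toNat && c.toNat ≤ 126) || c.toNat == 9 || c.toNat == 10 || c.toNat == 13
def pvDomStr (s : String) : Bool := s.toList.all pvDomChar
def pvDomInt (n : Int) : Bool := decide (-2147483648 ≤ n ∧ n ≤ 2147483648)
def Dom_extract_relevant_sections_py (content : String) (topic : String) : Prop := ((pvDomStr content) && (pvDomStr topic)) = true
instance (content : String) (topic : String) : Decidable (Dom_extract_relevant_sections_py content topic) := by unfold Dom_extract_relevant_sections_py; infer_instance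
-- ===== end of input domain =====

-- B replaces A's stateful one-pass flag scan by a two-phase block decomposition
-- (partition at headers, then emit/filter blocks); same cost, alternative structure.

-- ===== PORT A =====
-- one iteration of A's loop; state = (in_relevant_section, relevant_lines)
def pvAStep (tl : String) (st : Bool × List String) (line : String) : Bool × List String :=
  let ll := PySem.Str.lower line
  let s :=
    if PySem.Str.startswith line "#" && PySem.Str.isIn tl ll then true
    else if PySem.Str.startswith line "#" && !PySem.Str.isIn tl ll then false
    else st.1
  if s then (s, st.2 ++ [line])
  else if PySem.Str.isIn tl ll then (s, st.2 ++ [line])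
  else (s, st.2)

def extract_relevant_sections_py (content : String) (topic : String) : String :=
  if content == "" || topic == "" then ""
  else
    let tl := PySem.Str.lower topic
    let lines := (PySem.Str.split? content "\n").getD []
    let res := lines.foldl (pvAStep tl) (false, [])
    PySem.Str.join "\n" (PySem.List.slice res.2 none (some 50))

-- ===== PORT B =====
-- phase 1 step: state = (cur_match, cur_lines, blocks)
def pvBStep (tl : String) (st : Bool × List String × List (Bool × List String))
    (line : String) : Bool × List String × List (Bool × List String) :=
  if PySem.Str.startswith line "#" then
    (PySem.Str.isIn tl (PySem.Str.lower line), [line], st.2.2 ++ [(st.1, st.2.1)])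
  else
    (st.1, st.2.1 ++ [line], st.2.2)

-- phase 2: one block's contribution
def pvEmitBlock (tl : String) (b : Bool × List String) : List String :=
  if b.1 then b.2 else b.2.filter (fun l => PySem.Str.isIn tl (PySem.Str.lower l))

def extract_relevant_sections_py_alt (content : String) (topic : String) : String :=
  if content == "" || topic == "" then ""
  else
    let tl := PySem.Str.lower topic
    let fin := ((PySem.Str.split? content "\n").getD []).foldl (pvBStep tl) (false, [], [])
    let blocks := fin.2.2 ++ [(fin.1, fin.2.1)]
    let out := blocks.foldl (fun acc b => acc ++ pvEmitBlock tl b) []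
    PySem.Str.join "\n" (PySem.List.slice out none (some 50))

-- ===== PRECONDITION & SPEC =====
def Spec_extract_relevant_sections_py (content : String) (topic : String) (out : String) : Prop := out = extract_relevant_sections_py_alt content topic
instance (content : String) (topic : String) (out : String) : Decidable (Spec_extract_relevant_sections_py content topic out) := by unfold Spec_extract_relevant_sections_py; infer_instance

-- ===== CLAIM (what is proved, stated in full; the proofs are below) =====
def Claim_equal_extract_relevant_sections_py : Prop := ∀ (content : String) (topic : String), Dom_extract_relevant_sections_py content topic → Spec_extract_relevant_sections_py content topic (extract_relevant_sections_py content topic)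

-- ===== LEMMAS AND PROOFS =====

-- reference "emitted lines" spec, shared by both proofs
def pvEmit (tl : String) (s : Bool) : List String → List String
  | [] => []
  | l :: ls =>
    let s' := if PySem.Str.startswith l "#" then PySem.Str.isIn tl (PySem.Str.lower l) else s
    (if s' || PySem.Str.isIn tl (PySem.Str.lower l) then [l] else []) ++ pvEmit tl s' ls

lemma pvA_snd (tl : String) : ∀ (ls : List String) (s : Bool) (acc : List String),
    (ls.foldl (pvAStep tl) (s, acc)).2 = acc ++ pvEmit tl s ls := by
  intro ls
  induction ls with
  | nil => intro s acc; simp [pvEmit]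
  | cons l ls ih =>
    intro s acc
    cases h1 : PySem.Chars.startswith l.toList ['#'] <;>
      cases h2 : PySem.Chars.isIn tl.toList (PySem.Chars.lower l.toList) <;>
        cases s <;>
          simp [pvAStep, pvEmit, h1, h2, ih]

lemma pvB_inv (tl : String) : ∀ (ls : List String) (m : Bool) (cur : List String)
    (done : List (Bool × List String)),
    ((ls.foldl (pvBStep tl) (m, cur, done)).2.2
        ++ [((ls.foldl (pvBStep tl) (m, cur, done)).1,
             (ls.foldl (pvBStep tl) (m, cur, done)).2.1)]).flatMap (pvEmitBlock tl)
      = done.flatMap (pvEmitBlock tl) ++ pvEmitBlock tl (m, cur) ++ pvEmit tl m ls := by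
  intro ls
  induction ls with
  | nil => intro m cur done; simp [pvEmit]
  | cons l ls ih =>
    intro m cur done
    cases h1 : PySem.Chars.startswith l.toList ['#'] <;>
      cases h2 : PySem.Chars.isIn tl.toList (PySem.Chars.lower l.toList) <;>
        cases m <;>
          simp [pvBStep, pvEmit, pvEmitBlock, h1, h2, ih, List.filter_append]

-- ===== VERDICT (by name: the statement is the Claim_ definition above) =====
theorem extract_relevant_sections_py_spec : Claim_equal_extract_relevant_sections_py := by
  intro content topic _
  unfold Spec_extract_relevant_sections_py extract_relevant_sections_py extract_relevant_sections_py_alt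
  by_cases hg : (content == "" || topic == "") = true
  · simp [hg]
  · simp only [hg, if_false, Bool.false_eq_true]
    rw [PySem.List.foldl_append_eq_flatMap]
    rw [pvB_inv, pvA_snd]
    simp [pvEmitBlock]
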